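-- pv_equiv track=rewrite | github.com/cenodude/CrossWatch | _statistics.py | _counts_by_source
-- ===== SOURCE A (Python) =====
-- from typing import Dict, Any, List, Optional
--
-- def _counts_by_source(cur: Dict[str, Any]) -> Dict[str, int]:
--     plex_only = simkl_only = trakt_only = jellyfin_only = both_ps = 0
--     plex_total = simkl_total = trakt_total = jellyfin_total = 0
--
--     for v in (cur or {}).values():
--         p = bool((v or {}).get("p"))
--         s = bool((v or {}).get("s"))
--         t = bool((v or {}).get("t"))
--         j = bool((v or {}).get("j"))
--
--         plex_total     += 1 if p else 0
--         simkl_total    += 1 if s else 0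
--         trakt_total    += 1 if t else 0
--         jellyfin_total += 1 if j else 0
--
--         # "both" remains legacy "Plex + Simkl"
--         if p and s and not t and not j:
--             both_ps += 1
--         elif p and not s and not t and not j:
--             plex_only += 1
--         elif s and not p and not t and not j:
--             simkl_only += 1
--         elif t and not p and not s and not j:
--             trakt_only += 1
--         elif j and not p and not s and not t:
--             jellyfin_only += 1
--
--     # Preserve legacy keys; add jellyfin-specific counts
--     return {
--         "plex": plex_only,
--         "simkl": simkl_only,
--         "both": both_ps,
--         "plex_total": plex_total,
--         "simkl_total": simkl_total,
--         "trakt_total": trakt_total,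
--         "jellyfin_total": jellyfin_total,
--
--         "trakt": trakt_only,
--         "jellyfin": jellyfin_only,
--     }
-- ===== SOURCE B (Python) =====
-- def _counts_by_source(cur):
--     keys = [
--         (bool((v or {}).get("p")), bool((v or {}).get("s")),
--          bool((v or {}).get("t")), bool((v or {}).get("j")))
--         for v in (cur or {}).values()
--     ]
--     return {
--         "plex": keys.count((True, False, False, False)),
--         "simkl": keys.count((False, True, False, False)),
--         "both": keys.count((True, True, False, False)),
--         "plex_total": sum(1 if k[0] else 0 for k in keys),
--         "simkl_total": sum(1 if k[1] else 0 for k in keys),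
--         "trakt_total": sum(1 if k[2] else 0 for k in keys),
--         "jellyfin_total": sum(1 if k[3] else 0 for k in keys),
--         "trakt": keys.count((False, False, True, False)),
--         "jellyfin": keys.count((False, False, False, True)),
--     }
-- ===== Notes on version B (the rewrite author's own statement) =====
-- stated objective: simpler
-- what changed: Replaces the single loop with nine named accumulators and an if/elif exclusivity chain by mapping each item to its boolean flag tuple once and reading every answer off that key list with count/sum queries.
import Mathlib
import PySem

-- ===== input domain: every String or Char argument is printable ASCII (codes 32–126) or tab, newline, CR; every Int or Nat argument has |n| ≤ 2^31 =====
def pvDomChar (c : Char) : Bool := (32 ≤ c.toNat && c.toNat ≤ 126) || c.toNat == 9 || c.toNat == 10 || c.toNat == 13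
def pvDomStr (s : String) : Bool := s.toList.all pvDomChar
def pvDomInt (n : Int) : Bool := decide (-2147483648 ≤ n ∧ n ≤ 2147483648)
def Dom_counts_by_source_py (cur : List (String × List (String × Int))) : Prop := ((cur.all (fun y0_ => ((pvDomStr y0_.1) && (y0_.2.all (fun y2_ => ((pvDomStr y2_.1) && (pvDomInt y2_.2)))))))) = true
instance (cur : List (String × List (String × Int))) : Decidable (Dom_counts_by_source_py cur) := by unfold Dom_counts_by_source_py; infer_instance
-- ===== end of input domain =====

-- B replaces the one loop with nine accumulators and an if/elif chain by a map
-- to boolean flag tuples plus count/sum queries (objective: simpler).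

-- ===== PORT A =====
-- bool((v or {}).get(k)): missing key -> False, otherwise truthiness of the int
def pvFlag (v : List (String × Int)) (k : String) : Bool :=
  match (PySem.Dict.mk v).get? k with
  | none => false
  | some n => n != 0

-- one iteration of A's loop over its nine counters
-- (plex_only, simkl_only, trakt_only, jellyfin_only, both_ps, plex_total, simkl_total, trakt_total, jellyfin_total)
def pvStepA (st : Int × Int × Int × Int × Int × Int × Int × Int × Int)
    (kv : String × List (String × Int)) : Int × Int × Int × Int × Int × Int × Int × Int × Int :=
  let p := pvFlag kv.2 "p"
  let s := pvFlag kv.2 "s"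
  let t := pvFlag kv.2 "t"
  let j := pvFlag kv.2 "j"
  match st with
  | (po, so, tonly, jo, bps, pt, stot, tt, jt) =>
    let pt := pt + (if p then 1 else 0)
    let stot := stot + (if s then 1 else 0)
    let tt := tt + (if t then 1 else 0)
    let jt := jt + (if j then 1 else 0)
    if p && s && !t && !j then (po, so, tonly, jo, bps + 1, pt, stot, tt, jt)
    else if p && !s && !t && !j then (po + 1, so, tonly, jo, bps, pt, stot, tt, jt)
    else if s && !p && !t && !j then (po, so + 1, tonly, jo, bps, pt, stot, tt, jt)
    else if t && !p && !s && !j then (po, so, tonly + 1, jo, bps, pt, stot, tt, jt)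
    else if j && !p && !s && !t then (po, so, tonly, jo + 1, bps, pt, stot, tt, jt)
    else (po, so, tonly, jo, bps, pt, stot, tt, jt)

def counts_by_source_py (cur : List (String × List (String × Int))) : List (String × Int) :=
  match cur.foldl pvStepA (0, 0, 0, 0, 0, 0, 0, 0, 0) with
  | (po, so, tonly, jo, bps, pt, stot, tt, jt) =>
    [("plex", po), ("simkl", so), ("both", bps),
     ("plex_total", pt), ("simkl_total", stot), ("trakt_total", tt), ("jellyfin_total", jt),
     ("trakt", tonly), ("jellyfin", jo)]

-- ===== PORT B =====
def pvKey (v : List (String × Int)) : Bool × Bool × Bool × Bool :=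
  (pvFlag v "p", pvFlag v "s", pvFlag v "t", pvFlag v "j")

def counts_by_source_py_alt (cur : List (String × List (String × Int))) : List (String × Int) :=
  let keys := cur.map (fun kv => pvKey kv.2)
  [("plex", (PySem.List.count keys (true, false, false, false) : Int)),
   ("simkl", (PySem.List.count keys (false, true, false, false) : Int)),
   ("both", (PySem.List.count keys (true, true, false, false) : Int)),
   ("plex_total", (keys.map (fun k => if k.1 then (1 : Int) else 0)).sum),
   ("simkl_total", (keys.map (fun k => if k.2.1 then (1 : Int) else 0)).sum),
   ("trakt_total", (keys.map (fun k => if k.2.2.1 then (1 : Int) else 0)).sum),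
   ("jellyfin_total", (keys.map (fun k => if k.2.2.2 then (1 : Int) else 0)).sum),
   ("trakt", (PySem.List.count keys (false, false, true, false) : Int)),
   ("jellyfin", (PySem.List.count keys (false, false, false, true) : Int))]

-- ===== PRECONDITION & SPEC =====
def Spec_counts_by_source_py (cur : List (String × List (String × Int))) (out : List (String × Int)) : Prop := out = counts_by_source_py_alt cur
instance (cur : List (String × List (String × Int))) (out : List (String × Int)) : Decidable (Spec_counts_by_source_py cur out) := by unfold Spec_counts_by_source_py; infer_instance

-- ===== CLAIM (what is proved, stated in full; the proofs are below) =====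
def Claim_equal_counts_by_source_py : Prop := ∀ (cur : List (String × List (String × Int))), Dom_counts_by_source_py cur → Spec_counts_by_source_py cur (counts_by_source_py cur)

-- ===== LEMMAS AND PROOFS =====
-- A's fold from an arbitrary state adds, per counter, the corresponding count over the key list.
lemma pvFoldA_inv (cur : List (String × List (String × Int)))
    (a b c d e f g h i : Int) :
    cur.foldl pvStepA (a, b, c, d, e, f, g, h, i) =
      (a + ((cur.map (fun kv => pvKey kv.2)).count (true, false, false, false) : Int),
       b + ((cur.map (fun kv => pvKey kv.2)).count (false, true, false, false) : Int),
       c + ((cur.map (fun kv => pvKey kv.2)).count (false, false, true, false) : Int),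
       d + ((cur.map (fun kv => pvKey kv.2)).count (false, false, false, true) : Int),
       e + ((cur.map (fun kv => pvKey kv.2)).count (true, true, false, false) : Int),
       f + ((cur.map (fun kv => pvKey kv.2)).map (fun k => if k.1 then (1 : Int) else 0)).sum,
       g + ((cur.map (fun kv => pvKey kv.2)).map (fun k => if k.2.1 then (1 : Int) else 0)).sum,
       h + ((cur.map (fun kv => pvKey kv.2)).map (fun k => if k.2.2.1 then (1 : Int) else 0)).sum,
       i + ((cur.map (fun kv => pvKey kv.2)).map (fun k => if k.2.2.2 then (1 : Int) else 0)).sum) := by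
  induction cur generalizing a b c d e f g h i with
  | nil => simp
  | cons kv rest ih =>
    simp only [List.foldl_cons, List.map_cons, List.count_cons, List.sum_cons]
    rw [pvStepA]
    cases hp : pvFlag kv.2 "p" <;> cases hs : pvFlag kv.2 "s" <;>
      cases ht : pvFlag kv.2 "t" <;> cases hj : pvFlag kv.2 "j" <;>
      simp only [pvKey, hp, hs, ht, hj, 
        Bool.and_true, Bool.and_false, if_true,
        ih] <;> simp <;> omega

-- ===== VERDICT (by name: the statement is the Claim_ definition above) =====
theorem counts_by_source_py_spec : Claim_equal_counts_by_source_py := by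
  intro cur _
  unfold Spec_counts_by_source_py counts_by_source_py counts_by_source_py_alt
  rw [pvFoldA_inv]
  simp [PySem.List.count]
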